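-- pv_equiv track=rewrite | github.com/yuxihuan-cpu/browser-agent | examples/use-cases/game_2048_solver.py | _move_column_down
-- ===== SOURCE A (Python) =====
-- def _move_column_down(board: list[list[int]], col: int) -> list[list[int]]:
-- 	"""Move and merge tiles in a column downward."""
-- 	# Extract non-zero tiles (reversed)
-- 	tiles = [board[row][col] for row in range(3, -1, -1) if board[row][col] != 0]
--
-- 	# Merge adjacent equal tiles
-- 	merged = []
-- 	i = 0
-- 	while i < len(tiles):
-- 		if i + 1 < len(tiles) and tiles[i] == tiles[i + 1]:
-- 			merged.append(tiles[i] * 2)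
-- 			i += 2
-- 		else:
-- 			merged.append(tiles[i])
-- 			i += 1
--
-- 	# Pad with zeros
-- 	merged.extend([0] * (4 - len(merged)))
--
-- 	# Update board (reversed)
-- 	for row in range(4):
-- 		board[3 - row][col] = merged[row]
--
-- 	return board
-- ===== SOURCE B (Python) =====
-- def _move_column_down(board: list[list[int]], col: int) -> list[list[int]]:
-- 	"""Move and merge tiles in a column downward (single bottom-up pass with a write pointer)."""
-- 	new_col = [0, 0, 0, 0]
-- 	write = 3
-- 	can_merge = False
-- 	for row in range(3, -1, -1):
-- 		v = board[row][col]
-- 		if v == 0: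
-- 			continue
-- 		if can_merge and new_col[write + 1] == v:
-- 			new_col[write + 1] = 2 * v
-- 			can_merge = False
-- 		else:
-- 			new_col[write] = v
-- 			write -= 1
-- 			can_merge = True
-- 	for row in range(4):
-- 		board[row][col] = new_col[row]
-- 	return board
-- ===== Notes on version B (the rewrite author's own statement) =====
-- stated objective: alternative
-- what changed: A extracts the nonzero tiles into a list, merges adjacent equal pairs in a second while-loop and pads with zeros before writing back; B does one bottom-up pass over the column with a write pointer and a merge-eligibility flag, building the new column directly with no tiles/merge/pad pipeline.
import Mathlib
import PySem

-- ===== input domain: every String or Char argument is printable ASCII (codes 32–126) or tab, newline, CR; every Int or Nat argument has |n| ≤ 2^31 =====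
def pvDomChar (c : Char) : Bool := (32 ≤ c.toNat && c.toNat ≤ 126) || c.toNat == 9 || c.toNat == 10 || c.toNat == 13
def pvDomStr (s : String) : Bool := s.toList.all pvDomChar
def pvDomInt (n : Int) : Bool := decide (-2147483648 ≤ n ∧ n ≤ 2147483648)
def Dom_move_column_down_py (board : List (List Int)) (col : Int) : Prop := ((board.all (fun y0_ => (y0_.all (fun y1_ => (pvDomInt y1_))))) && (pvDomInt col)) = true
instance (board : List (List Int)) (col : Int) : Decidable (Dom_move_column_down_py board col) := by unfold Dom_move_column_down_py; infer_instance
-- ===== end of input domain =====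

-- B replaces A's extract/merge/pad pipeline by a single bottom-up pass with a write pointer
-- and a merge-eligibility flag (objective: alternative). Both Pythons mutate `board` in place
-- and return it; they write exactly the same cells, so mutation and return value coincide.

-- board[i][col] as an Int (total form; Pre_ keeps the indices in range)
def pvGet2 (b : List (List Int)) (i col : Int) : Int :=
  PySem.List.pyGetD (PySem.List.pyGetD b i []) col 0

-- board[i][col] = v
def pvSet2 (b : List (List Int)) (i col : Int) (v : Int) : List (List Int) :=
  PySem.List.pySetD b i (PySem.List.pySetD (PySem.List.pyGetD b i []) col v)

-- ===== PORT A =====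
-- the `while i < len(tiles)` merge loop of A, as the obvious structural recursion
def pvMergeA : List Int → List Int
  | [] => []
  | [a] => [a]
  | a :: b :: rest => if a = b then a * 2 :: pvMergeA rest else a :: pvMergeA (b :: rest)

def move_column_down_py (board : List (List Int)) (col : Int) : List (List Int) :=
  let tiles := ((PySem.List.pyRange 3 (-1) (-1)).map
      (fun row => pvGet2 board row col)).filter (fun v => v != 0)
  let merged := pvMergeA tiles
  let merged := merged ++ List.replicate (4 - merged.length) 0
  (PySem.List.pyRange 0 4 1).foldl
    (fun b row => pvSet2 b (3 - row) col (PySem.List.pyGetD merged row 0)) board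

-- ===== PORT B =====
-- one step of B's bottom-up pass: state = (new_col, write, can_merge), v = board[row][col]
def pvStep (s : List Int × Int × Bool) (v : Int) : List Int × Int × Bool :=
  if v = 0 then s
  else if s.2.2 && (PySem.List.pyGetD s.1 (s.2.1 + 1) 0 == v) then
    (PySem.List.pySetD s.1 (s.2.1 + 1) (2 * v), s.2.1, false)
  else
    (PySem.List.pySetD s.1 s.2.1 v, s.2.1 - 1, true)

def move_column_down_py_alt (board : List (List Int)) (col : Int) : List (List Int) :=
  let s := (PySem.List.pyRange 3 (-1) (-1)).foldl
    (fun s row => pvStep s (pvGet2 board row col)) ([0, 0, 0, 0], 3, false)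
  (PySem.List.pyRange 0 4 1).foldl
    (fun b row => pvSet2 b row col (PySem.List.pyGetD s.1 row 0)) board

-- ===== PRECONDITION & SPEC =====
-- exactly where A returns: at least 4 rows, and `col` a valid Python index into each of rows 0..3
def Pre_move_column_down_py (board : List (List Int)) (col : Int) : Prop :=
  4 ≤ board.length ∧ ∀ r ∈ board.take 4, PySem.Raise.InRange r.length col
instance (board : List (List Int)) (col : Int) : Decidable (Pre_move_column_down_py board col) := by unfold Pre_move_column_down_py; infer_instance
def pvWitness_move_column_down_py : List (List Int) × Int := ([[2], [2], [0], [4]], 0)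

def Spec_move_column_down_py (board : List (List Int)) (col : Int) (out : List (List Int)) : Prop := out = move_column_down_py_alt board col
instance (board : List (List Int)) (col : Int) (out : List (List Int)) : Decidable (Spec_move_column_down_py board col out) := by unfold Spec_move_column_down_py; infer_instance

-- ===== CLAIM (what is proved, stated in full; the proofs are below) =====
def Claim_equal_move_column_down_py : Prop := ∀ (board : List (List Int)) (col : Int), Dom_move_column_down_py board col → Pre_move_column_down_py board col → Spec_move_column_down_py board col (move_column_down_py board col)

-- ===== LEMMAS AND PROOFS =====

theorem pvGetD_nonneg (xs : List Int) (i d : Int) (h : 0 ≤ i) :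
    PySem.List.pyGetD xs i d = xs.getD i.toNat d := by
  simp only [PySem.List.pyGetD, PySem.List.pyGet?, PySem.List.pyIdx?, h, if_pos,
    List.getD_eq_getElem?_getD]
  split
  · simp
  · rw [List.getElem?_eq_none (by omega)]; simp

theorem pvGetD_nonneg' (xs : List (List Int)) (i : Int) (d : List Int) (h : 0 ≤ i) :
    PySem.List.pyGetD xs i d = xs.getD i.toNat d := by
  simp only [PySem.List.pyGetD, PySem.List.pyGet?, PySem.List.pyIdx?, h, if_pos,
    List.getD_eq_getElem?_getD]
  split
  · simp
  · rw [List.getElem?_eq_none (by omega)]; simp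

theorem pvSet2_nonneg (b : List (List Int)) (i col v : Int) (h : 0 ≤ i) :
    pvSet2 b i col v = b.set i.toNat (PySem.List.pySetD (b.getD i.toNat []) col v) := by
  rw [pvSet2, PySem.List.pySetD_of_nonneg _ _ h, pvGetD_nonneg' _ _ _ h]

theorem pvSet2_comm (b : List (List Int)) (i j col v w : Int)
    (hi : 0 ≤ i) (hj : 0 ≤ j) (hij : i ≠ j) :
    pvSet2 (pvSet2 b i col v) j col w = pvSet2 (pvSet2 b j col w) i col v := by
  have hn : i.toNat ≠ j.toNat := by omega
  simp only [pvSet2_nonneg _ _ _ _ hi, pvSet2_nonneg _ _ _ _ hj,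
    List.getD_eq_getElem?_getD, List.getElem?_set_ne hn, List.getElem?_set_ne (Ne.symm hn)]
  exact List.set_comm _ _ hn

theorem pvSet4_rev (b : List (List Int)) (col x0 x1 x2 x3 : Int) :
    pvSet2 (pvSet2 (pvSet2 (pvSet2 b 3 col x3) 2 col x2) 1 col x1) 0 col x0
      = pvSet2 (pvSet2 (pvSet2 (pvSet2 b 0 col x0) 1 col x1) 2 col x2) 3 col x3 := by
  rw [pvSet2_comm _ 1 0 _ _ _ (by omega) (by omega) (by omega),
      pvSet2_comm _ 2 0 _ _ _ (by omega) (by omega) (by omega),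
      pvSet2_comm _ 3 0 _ _ _ (by omega) (by omega) (by omega),
      pvSet2_comm _ 2 1 _ _ _ (by omega) (by omega) (by omega),
      pvSet2_comm _ 3 1 _ _ _ (by omega) (by omega) (by omega),
      pvSet2_comm _ 3 2 _ _ _ (by omega) (by omega) (by omega)]

-- evaluation of pySetD / pyGetD on a literal 4-list at a literal index
theorem pvE0 (a b c d v : Int) : PySem.List.pySetD [a,b,c,d] 0 v = [v,b,c,d] := rfl
theorem pvE1 (a b c d v : Int) : PySem.List.pySetD [a,b,c,d] 1 v = [a,v,c,d] := rfl
theorem pvE2 (a b c d v : Int) : PySem.List.pySetD [a,b,c,d] 2 v = [a,b,v,d] := rfl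
theorem pvE3 (a b c d v : Int) : PySem.List.pySetD [a,b,c,d] 3 v = [a,b,c,v] := rfl
theorem pvG1 (a b c d : Int) : PySem.List.pyGetD [a,b,c,d] 1 0 = b := rfl
theorem pvG2 (a b c d : Int) : PySem.List.pyGetD [a,b,c,d] 2 0 = c := rfl
theorem pvG3 (a b c d : Int) : PySem.List.pyGetD [a,b,c,d] 3 0 = d := rfl

-- A's padded merged column, as a function of the column read bottom-up
def pvA4 (a3 a2 a1 a0 : Int) : List Int :=
  let merged := pvMergeA (([a3, a2, a1, a0] : List Int).filter (fun v => v != 0))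
  merged ++ List.replicate (4 - merged.length) 0

-- the bridge: B's pass produces exactly A's merged column, reversed
set_option maxHeartbeats 1000000 in
theorem pvKeyCols (a3 a2 a1 a0 : Int) :
    (pvStep (pvStep (pvStep (pvStep ([0, 0, 0, 0], 3, false) a3) a2) a1) a0).1
      = [PySem.List.pyGetD (pvA4 a3 a2 a1 a0) 3 0,
         PySem.List.pyGetD (pvA4 a3 a2 a1 a0) 2 0,
         PySem.List.pyGetD (pvA4 a3 a2 a1 a0) 1 0,
         PySem.List.pyGetD (pvA4 a3 a2 a1 a0) 0 0] := by
  by_cases h3 : a3 = 0 <;> by_cases h2 : a2 = 0 <;> by_cases h1 : a1 = 0 <;> by_cases h0 : a0 = 0 <;>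
    simp [pvStep, pvA4, pvMergeA, h3, h2, h1, h0, pvE2, pvE3, pvG1, pvG2, pvG3] <;>
    split_ifs <;> simp_all [pvE0, pvE1, pvE2, pvE3, pvG1, pvG2, pvG3] <;> omega

-- ===== VERDICT (by name: the statement is the Claim_ definition above) =====
theorem move_column_down_py_spec : Claim_equal_move_column_down_py := by
  intro board col _ _
  unfold Spec_move_column_down_py
  show move_column_down_py board col = move_column_down_py_alt board col
  simp only [move_column_down_py, move_column_down_py_alt,
    show PySem.List.pyRange 3 (-1) (-1) = [3, 2, 1, 0] from by decide,
    show PySem.List.pyRange 0 4 1 = [0, 1, 2, 3] from by decide,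
    List.map, List.filter, List.foldl]
  rw [pvKeyCols]
  norm_num [pvGetD_nonneg]
  exact pvSet4_rev board col _ _ _ _
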